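-- pv_equiv track=rewrite | github.com/doxygen/doxygen | addon/doxywizard/sync_option_translations.py | generate_option_description
-- ===== SOURCE A (Python) =====
-- def generate_option_description(option_id: str) -> str:
--     """Generate a human-readable description from an option ID."""
--     words = []
--     current_word = ''
--
--     for char in option_id:
--         if char == '_':
--             if current_word:
--                 words.append(current_word)
--                 current_word = ''
--         elif char.isupper() and current_word and not current_word[-1].isupper():
--             words.append(current_word)
--             current_word = char
--         else:
--             current_word += char
--
--     if current_word:
--         words.append(current_word)
--
--     return ' '.join(words).title()
-- ===== SOURCE B (Python) =====
-- def generate_option_description(option_id: str) -> str: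
--     """Generate a human-readable description from an option ID."""
--     words = []
--     for seg in option_id.split('_'):
--         if not seg:
--             continue
--         start = 0
--         for i in range(1, len(seg)):
--             if seg[i].isupper() and not seg[i - 1].isupper():
--                 words.append(seg[start:i])
--                 start = i
--         words.append(seg[start:])
--     return ' '.join(words).title()
-- ===== Notes on version B (the rewrite author's own statement) =====
-- stated objective: alternative
-- what changed: A's single character-by-character loop accumulating a current word across the whole ID is replaced by an up-front split('_') followed by a per-segment index scan that cuts each segment at lower-to-upper boundaries via slices; join and title() are unchanged.
import Mathlib
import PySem

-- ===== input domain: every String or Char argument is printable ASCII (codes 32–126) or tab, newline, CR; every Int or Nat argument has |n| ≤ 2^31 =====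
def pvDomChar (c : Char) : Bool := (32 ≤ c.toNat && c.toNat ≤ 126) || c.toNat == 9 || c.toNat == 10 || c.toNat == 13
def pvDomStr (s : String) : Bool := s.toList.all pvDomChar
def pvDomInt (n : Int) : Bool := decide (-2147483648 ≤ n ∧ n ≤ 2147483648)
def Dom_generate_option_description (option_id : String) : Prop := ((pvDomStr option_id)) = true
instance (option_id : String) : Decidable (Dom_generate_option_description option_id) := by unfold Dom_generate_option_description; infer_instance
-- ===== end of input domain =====

-- B replaces A's single accumulating character loop by an up-front split('_') followed by an
-- index scan per segment that cuts at lower→upper boundaries (objective: alternative decomposition).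

-- hand port of str.title(): a cased character is uppercased after a non-cased one, lowered otherwise;
-- on the printable-ASCII domain 'cased' is exactly isalpha, so this is exact there.
def pvTitleGo : Bool → List Char → List Char
  | _, [] => []
  | prev, c :: rest =>
    if PySem.Chars.isalpha c then
      (if prev then PySem.Chars.lowerChar c else PySem.Chars.upperChar c) :: pvTitleGo true rest
    else c :: pvTitleGo false rest

def pvTitle (cs : List Char) : List Char := pvTitleGo false cs

-- ===== PORT A =====
def pvLastUpper (cw : List Char) : Bool := PySem.Chars.isupper (cw.getLastD ' ')

def pvStepA (st : List (List Char) × List Char) (c : Char) : List (List Char) × List Char :=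
  if c = '_' then
    if st.2.isEmpty then st else (st.1 ++ [st.2], [])
  else if PySem.Chars.isupper c && !st.2.isEmpty && !pvLastUpper st.2 then
    (st.1 ++ [st.2], [c])
  else
    (st.1, st.2 ++ [c])

def generate_option_description (option_id : String) : String :=
  let st := option_id.toList.foldl pvStepA ([], [])
  let words := if st.2.isEmpty then st.1 else st.1 ++ [st.2]
  String.mk (pvTitle (PySem.Chars.join [' '] words))

-- ===== PORT B =====
def pvCutStep (seg : List Char) (st : List (List Char) × Int) (i : Int) : List (List Char) × Int :=
  if PySem.Chars.isupper (PySem.List.pyGetD seg i ' ') &&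
     !PySem.Chars.isupper (PySem.List.pyGetD seg (i - 1) ' ') then
    (st.1 ++ [PySem.List.slice seg (some st.2) (some i)], i)
  else st

def generate_option_description_alt (option_id : String) : String :=
  let words := (PySem.Chars.splitOn option_id.toList ['_']).foldl
    (fun ws seg =>
      if seg.isEmpty then ws
      else
        let st := (PySem.List.pyRange 1 (seg.length : Int) 1).foldl (pvCutStep seg) (ws, 0)
        st.1 ++ [PySem.List.slice seg (some st.2) none]) []
  String.mk (pvTitle (PySem.Chars.join [' '] words))

-- ===== PRECONDITION & SPEC =====
def Spec_generate_option_description (option_id : String) (out : String) : Prop := out = generate_option_description_alt option_id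
instance (option_id : String) (out : String) : Decidable (Spec_generate_option_description option_id out) := by unfold Spec_generate_option_description; infer_instance

-- ===== CLAIM (what is proved, stated in full; the proofs are below) =====
def Claim_equal_generate_option_description : Prop := ∀ (option_id : String), Dom_generate_option_description option_id → Spec_generate_option_description option_id (generate_option_description option_id)

-- ===== LEMMAS AND PROOFS =====

-- split on a single '_' as clean structural recursion
def pvSplitU : List Char → List (List Char)
  | [] => [[]]
  | c :: rest => if c = '_' then [] :: pvSplitU rest else (pvSplitU rest).modifyHead (c :: ·)

lemma pvSplitU_ne_nil (cs : List Char) : pvSplitU cs ≠ [] := by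
  cases cs with
  | nil => simp [pvSplitU]
  | cons c rest =>
      simp only [pvSplitU]
      split_ifs
      · simp
      · cases h : pvSplitU rest with
        | nil => exact absurd h (pvSplitU_ne_nil rest)
        | cons s ss => simp

lemma pvSplitOn_go_eq : ∀ (fuel : Nat) (cs cur : List Char) (acc : List (List Char)),
    cs.length < fuel →
    PySem.Chars.splitOn.go ['_'] fuel cs cur acc
      = acc.reverse ++ (pvSplitU cs).modifyHead (cur.reverse ++ ·) := by
  intro fuel
  induction fuel with
  | zero => intro cs cur acc h; omega
  | succ f ih =>
      intro cs cur acc h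
      cases cs with
      | nil =>
          simp [PySem.Chars.splitOn.go, pvSplitU]
      | cons c rest =>
          rw [PySem.Chars.splitOn.go]
          by_cases hc : c = '_'
          · subst hc
            simp only [List.isPrefixOf, BEq.rfl, Bool.true_and, if_pos, List.length_cons,
              List.length_nil, Nat.zero_add, List.drop_succ_cons, List.drop_zero]
            rw [ih rest [] (cur.reverse :: acc) (by simpa using h)]
            simp only [pvSplitU, List.reverse_cons, List.reverse_nil, List.nil_append]
            cases hs : pvSplitU rest with
            | nil => exact absurd hs (pvSplitU_ne_nil rest)
            | cons s ss => simp
          · have hp : List.isPrefixOf ['_'] (c :: rest) = false := by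
              simp [List.isPrefixOf]; exact fun hh => absurd hh.symm hc
            rw [if_neg (by simp [hp])]
            rw [ih rest (c :: cur) acc (by simpa using h)]
            simp only [pvSplitU, if_neg hc]
            cases hs : pvSplitU rest with
            | nil => exact absurd hs (pvSplitU_ne_nil rest)
            | cons s ss => simp
lemma pvSplitOn_eq (cs : List Char) : PySem.Chars.splitOn cs ['_'] = pvSplitU cs := by
  rw [PySem.Chars.splitOn, pvSplitOn_go_eq (cs.length + 1) cs [] [] (by omega)]
  cases h : pvSplitU cs with
  | nil => exact absurd h (pvSplitU_ne_nil cs)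
  | cons s ss => simp
-- the word list of one underscore-free segment, cut before each uppercase that follows a non-uppercase
def pvWordsSeg (cw : List Char) : List Char → List (List Char)
  | [] => [cw]
  | c :: rest =>
    if PySem.Chars.isupper c && !pvLastUpper cw then cw :: pvWordsSeg [c] rest
    else pvWordsSeg (cw ++ [c]) rest

def pvSegWords : List Char → List (List Char)
  | [] => []
  | c :: rest => pvWordsSeg [c] rest

def pvContWords (cw : List Char) (parts : List (List Char)) : List (List Char) :=
  match parts with
  | [] => []
  | s :: ss => (if cw.isEmpty then pvSegWords s else pvWordsSeg cw s) ++ ss.flatMap pvSegWords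

lemma pvContWords_nil_left (parts : List (List Char)) :
    pvContWords [] parts = parts.flatMap pvSegWords := by
  cases parts <;> simp [pvContWords]

def pvFlushA (st : List (List Char) × List Char) : List (List Char) :=
  if st.2.isEmpty then st.1 else st.1 ++ [st.2]

lemma pvA_inv : ∀ (cs : List Char) (ws : List (List Char)) (cw : List Char),
    pvFlushA (cs.foldl pvStepA (ws, cw)) = ws ++ pvContWords cw (pvSplitU cs) := by
  intro cs
  induction cs with
  | nil =>
      intro ws cw
      cases cw <;> simp [pvFlushA, pvSplitU, pvContWords, pvSegWords, pvWordsSeg]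
  | cons c rest ih =>
      intro ws cw
      simp only [List.foldl_cons]
      by_cases hc : c = '_'
      · subst hc
        obtain ⟨s, ss, hs⟩ : ∃ s ss, pvSplitU rest = s :: ss := by
          cases h : pvSplitU rest with
          | nil => exact absurd h (pvSplitU_ne_nil rest)
          | cons s ss => exact ⟨s, ss, rfl⟩
        cases cw with
        | nil =>
            rw [show pvStepA (ws, []) '_' = (ws, []) by simp [pvStepA]]
            rw [ih ws []]
            simp [pvSplitU, pvContWords, hs, pvSegWords]
        | cons a cw' =>
            rw [show pvStepA (ws, a :: cw') '_' = (ws ++ [a :: cw'], []) by simp [pvStepA]]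
            rw [ih (ws ++ [a :: cw']) []]
            simp [pvSplitU, pvContWords, hs, pvSegWords, pvWordsSeg]
      · obtain ⟨s, ss, hs⟩ : ∃ s ss, pvSplitU rest = s :: ss := by
          cases h : pvSplitU rest with
          | nil => exact absurd h (pvSplitU_ne_nil rest)
          | cons s ss => exact ⟨s, ss, rfl⟩
        have hsp : pvSplitU (c :: rest) = (c :: s) :: ss := by
          simp [pvSplitU, hc, hs]
        cases cw with
        | nil =>
            rw [show pvStepA (ws, []) c = (ws, [c]) by simp [pvStepA, hc]]
            rw [ih ws [c]]
            simp [hsp, hs, pvContWords, pvSegWords]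
        | cons a cw' =>
            by_cases hb : (PySem.Chars.isupper c && !pvLastUpper (a :: cw')) = true
            · rw [show pvStepA (ws, a :: cw') c = (ws ++ [a :: cw'], [c]) by
                simp [pvStepA, hc]; simp at hb; tauto]
              rw [ih (ws ++ [a :: cw']) [c]]
              simp only [hsp, hs, pvContWords, pvSegWords, pvWordsSeg, if_pos hb]
              simp
            · rw [show pvStepA (ws, a :: cw') c = (ws, (a :: cw') ++ [c]) by
                simp only [pvStepA, if_neg hc]
                rw [if_neg]; simp at hb ⊢; tauto]
              rw [ih ws ((a :: cw') ++ [c])]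
              simp only [hsp, hs, pvContWords, pvWordsSeg, if_neg hb]
              simp
-- B's inner fold: the word accumulator threads through by appending
lemma pvB_shift (seg : List Char) : ∀ (r : List Int) (ws : List (List Char)) (s : Int),
    r.foldl (pvCutStep seg) (ws, s)
      = (ws ++ (r.foldl (pvCutStep seg) ([], s)).1, (r.foldl (pvCutStep seg) ([], s)).2) := by
  intro r
  induction r with
  | nil => intro ws s; simp
  | cons i r ih =>
      intro ws s
      simp only [List.foldl_cons]
      by_cases hb : (PySem.Chars.isupper (PySem.List.pyGetD seg i ' ') &&
          !PySem.Chars.isupper (PySem.List.pyGetD seg (i - 1) ' ')) = true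
      · simp only [pvCutStep, if_pos hb, List.nil_append]
        rw [ih (ws ++ [PySem.List.slice seg (some s) (some i)]) i,
            ih [PySem.List.slice seg (some s) (some i)] i]
        simp
      · simp only [pvCutStep, if_neg hb]
        exact ih ws s

-- getLast of the current slice is the char before position j
lemma pv_last_slice (seg : List Char) (start j : Nat) (h1 : start < j) (h2 : j ≤ seg.length) (d : Char) :
    ((seg.drop start).take (j - start)).getLastD d = seg.getD (j - 1) d := by
  have hlen : ((seg.drop start).take (j - start)).length = j - start := by
    simp [List.length_take, List.length_drop]; omega
  have hne : (seg.drop start).take (j - start) ≠ [] := by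
    intro hnil; rw [hnil] at hlen; simp at hlen; omega
  rw [List.getLastD_eq_getLast?, List.getLast?_eq_some_getLast hne, Option.getD_some,
      List.getLast_eq_getElem]
  rw [List.getElem_take, List.getElem_drop]
  rw [List.getD_eq_getElem (hn := by omega)]
  congr 1
  omega

lemma pv_take_succ (seg : List Char) (start j : Nat) (hsj : start ≤ j) (hj : j < seg.length) (d : Char) :
    (seg.drop start).take (j + 1 - start) = (seg.drop start).take (j - start) ++ [seg.getD j d] := by
  have hm : j + 1 - start = (j - start) + 1 := by omega
  rw [hm, List.take_succ]
  congr 1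
  rw [List.getElem?_drop]
  rw [show start + (j - start) = j by omega]
  rw [List.getElem?_eq_getElem hj, List.getD_eq_getElem (hn := hj)]
  rfl

lemma pv_drop_cons (seg : List Char) (j : Nat) (hj : j < seg.length) (d : Char) :
    seg.drop j = seg.getD j d :: seg.drop (j + 1) := by
  rw [List.drop_eq_getElem_cons hj, List.getD_eq_getElem _ _ hj]
lemma pvB_inv (seg : List Char) : ∀ (k j start : Nat), 1 ≤ j → j + k = seg.length → start < j →
    (let st := (PySem.List.pyRange (j : Int) (seg.length : Int) 1).foldl (pvCutStep seg) ([], (start : Int))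
     st.1 ++ [PySem.List.slice seg (some st.2) none])
      = pvWordsSeg ((seg.drop start).take (j - start)) (seg.drop j) := by
  intro k
  induction k with
  | zero =>
      intro j start h1 h2 h3
      have hj : (j : Int) = (seg.length : Int) := by omega
      rw [hj, PySem.List.pyRange_one_eq_nil (by omega)]
      simp only [List.foldl_nil]
      have hd : seg.drop j = [] := by
        apply List.drop_eq_nil_of_le; omega
      rw [hd, pvWordsSeg]
      simp only [List.nil_append]
      rw [PySem.List.slice_from_natCast]
      congr 1
      rw [List.take_of_length_le (by rw [List.length_drop]; omega)]
  | succ k ih =>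
      intro j start h1 h2 h3
      have hjlt : j < seg.length := by omega
      have hcons : PySem.List.pyRange (j : Int) (seg.length : Int) 1
          = (j : Int) :: PySem.List.pyRange ((j : Int) + 1) (seg.length : Int) 1 :=
        PySem.List.pyRange_one_cons (by omega)
      have hcast : ((j : Int) + 1) = ((j + 1 : Nat) : Int) := by omega
      have hgj : PySem.List.pyGetD seg (j : Int) ' ' = seg.getD j ' ' := by
        simp
      have hgj1 : PySem.List.pyGetD seg ((j : Int) - 1) ' ' = seg.getD (j - 1) ' ' := by
        rw [show (j : Int) - 1 = ((j - 1 : Nat) : Int) by omega]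
        simp
      have hlast : pvLastUpper ((seg.drop start).take (j - start))
          = PySem.Chars.isupper (seg.getD (j - 1) ' ') := by
        rw [pvLastUpper, pv_last_slice seg start j h3 (by omega)]
      have hdropj : seg.drop j = seg.getD j ' ' :: seg.drop (j + 1) := pv_drop_cons seg j hjlt ' '
      rw [hcons]
      simp only [List.foldl_cons]
      by_cases hb : (PySem.Chars.isupper (seg.getD j ' ') &&
          !PySem.Chars.isupper (seg.getD (j - 1) ' ')) = true
      · rw [show pvCutStep seg ([], (start : Int)) (j : Int)
            = ([PySem.List.slice seg (some (start : Int)) (some (j : Int))], (j : Int)) by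
          simp only [pvCutStep, hgj, hgj1]; rw [if_pos hb]; simp]
        rw [pvB_shift seg _ [PySem.List.slice seg (some (start : Int)) (some (j : Int))] (j : Int)]
        have ihj := ih (j + 1) j (by omega) (by omega) (by omega)
        simp only at ihj
        rw [show j + 1 - j = 1 from by omega, hdropj] at ihj
        simp only [List.take_succ_cons, List.take_zero] at ihj
        rw [hcast]
        simp only [List.cons_append, List.nil_append]
        rw [hdropj, pvWordsSeg, if_pos (by rw [hlast]; exact hb)]
        rw [PySem.List.slice_natCast, ihj]
      · rw [show pvCutStep seg ([], (start : Int)) (j : Int) = ([], (start : Int)) by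
          simp only [pvCutStep, hgj, hgj1]; rw [if_neg hb]]
        have ihs := ih (j + 1) start (by omega) (by omega) (by omega)
        simp only [hcast] at ihs ⊢
        rw [ihs]
        rw [pv_take_succ seg start j (by omega) hjlt ' ']
        rw [hdropj, pvWordsSeg, if_neg (by rw [hlast]; simpa using hb)]
lemma pvB_seg (seg : List Char) :
    (if seg.isEmpty then ([] : List (List Char))
     else
       let st := (PySem.List.pyRange 1 (seg.length : Int) 1).foldl (pvCutStep seg) ([], 0)
       st.1 ++ [PySem.List.slice seg (some st.2) none])
      = pvSegWords seg := by
  cases seg with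
  | nil => simp [pvSegWords]
  | cons c rest =>
      have h := pvB_inv (c :: rest) rest.length 1 0 (by omega) (by simp; omega) (by omega)
      simp only at h
      rw [show ((1 : Nat) : Int) = (1 : Int) by norm_num, Nat.cast_zero] at h
      simp only [List.drop_zero, List.take_succ_cons, List.take_zero, List.drop_succ_cons,
        List.drop_zero] at h
      simp only [List.isEmpty_cons]
      rw [h]
      rfl
lemma pvB_outer : ∀ (parts : List (List Char)) (ws : List (List Char)),
    parts.foldl
      (fun ws seg =>
        if seg.isEmpty then ws
        else
          let st := (PySem.List.pyRange 1 (seg.length : Int) 1).foldl (pvCutStep seg) (ws, 0)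
          st.1 ++ [PySem.List.slice seg (some st.2) none]) ws
      = ws ++ parts.flatMap pvSegWords := by
  intro parts
  induction parts with
  | nil => intro ws; simp
  | cons seg rest ih =>
      intro ws
      simp only [List.foldl_cons, List.flatMap_cons]
      by_cases he : seg.isEmpty
      · rw [if_pos he, ih ws]
        have : pvSegWords seg = [] := by
          cases seg with
          | nil => rfl
          | cons a b => simp at he
        rw [this]
        rfl
      · rw [if_neg he]
        rw [pvB_shift seg _ ws 0]
        rw [ih]
        have hs := pvB_seg seg
        rw [if_neg he] at hs
        simp only at hs
        rw [List.append_assoc, List.append_assoc, ← List.append_assoc _ _ (List.flatMap pvSegWords rest)]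
        rw [hs]
-- ===== VERDICT (by name: the statement is the Claim_ definition above) =====
theorem generate_option_description_spec : Claim_equal_generate_option_description := by
  intro s _
  unfold Spec_generate_option_description generate_option_description generate_option_description_alt
  have hA := pvA_inv s.toList [] []
  simp only [pvFlushA, pvContWords_nil_left, List.nil_append] at hA
  simp only [pvSplitOn_eq, pvB_outer, hA, List.nil_append]
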